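-- pv_equiv track=rewrite | github.com/Awrthdrew/algoritmo-estructura-datos | semana_6/EjerciciosMatrices_CONCLUIR.py | hayColumnaLlena
-- ===== SOURCE A (Python) =====
-- def hayColumnaLlena(matriz):
--     totalLineas=len(matriz)
--     totalColumnas=len(matriz[0])
--     hayColumna = False
--     elementoAnterior=""
--     for i in range(totalColumnas):
--         elementoAnterior=matriz[0][i]
--
--         #el simbolo '.' significa vacio
--         if elementoAnterior==".": elementoAnterior=""
--
--         hayColumna=True
--
--         for j in range(totalLineas):
--             elemento=matriz[j][i]
--             hayColumna = hayColumna and elemento==elementoAnterior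
--             elementoAnterior=elemento
--
--         if(hayColumna):
--             return hayColumna
--
--     return hayColumna
-- ===== SOURCE B (Python) =====
-- def hayColumnaLlena(matriz):
--     first = matriz[0]
--     candidatos = [i for i in range(len(first)) if first[i] != '.']
--     for fila in matriz:
--         if not candidatos:
--             break
--         candidatos = [i for i in candidatos if fila[i] == first[i]]
--     return bool(candidatos)
-- ===== Notes on version B (the rewrite author's own statement) =====
-- stated objective: alternative
-- what changed: B traverses the matrix row-major instead of A's column-major scan: it starts from the set of candidate column indices whose first-row cell is not '.', filters that candidate set against each row in turn (stopping early when it empties), and returns whether any candidate survives.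
-- outside the precondition, e.g. on hayColumnaLlena([['a', 'b'], ['a']]): A returns True, B raises IndexError
import Mathlib
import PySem

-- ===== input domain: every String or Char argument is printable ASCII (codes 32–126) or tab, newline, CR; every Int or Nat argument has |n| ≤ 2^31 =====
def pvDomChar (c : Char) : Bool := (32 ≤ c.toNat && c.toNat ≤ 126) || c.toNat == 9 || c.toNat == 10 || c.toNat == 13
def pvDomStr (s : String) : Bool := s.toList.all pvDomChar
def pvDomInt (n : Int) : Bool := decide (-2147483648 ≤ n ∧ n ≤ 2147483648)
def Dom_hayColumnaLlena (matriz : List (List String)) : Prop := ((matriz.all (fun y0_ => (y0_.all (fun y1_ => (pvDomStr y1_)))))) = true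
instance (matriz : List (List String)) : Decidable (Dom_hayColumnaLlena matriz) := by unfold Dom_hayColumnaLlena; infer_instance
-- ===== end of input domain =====

-- B replaces A's column-major scan with a row-major pass that filters a shrinking set of
-- candidate column indices (objective: alternative decomposition, same cost).

-- ===== PORT A =====
-- inner `for j in range(totalLineas)` loop of A: threads (hayColumna, elementoAnterior)
def pvAColRes (matriz : List (List String)) (totalLineas : Int) (i : Int) : Bool :=
  let prev0 := PySem.List.pyGetD (PySem.List.pyGetD matriz 0 []) i ""
  let prev := if prev0 == "." then "" else prev0
  -- elemento := matriz[j][i] inlined in the two places Python uses it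
  ((PySem.List.pyRange 0 totalLineas 1).foldl
      (fun (st : Bool × String) j =>
        (st.1 && (PySem.List.pyGetD (PySem.List.pyGetD matriz j []) i "" == st.2),
          PySem.List.pyGetD (PySem.List.pyGetD matriz j []) i ""))
      (true, prev)).1

-- outer `for i in range(totalColumnas)` loop of A, with its early return
def pvALoop (matriz : List (List String)) (totalLineas : Int) : List Int → Bool → Bool
  | [], hay => hay
  | i :: rest, _hay =>
    let hay' := pvAColRes matriz totalLineas i
    if hay' then hay' else pvALoop matriz totalLineas rest hay'

def hayColumnaLlena (matriz : List (List String)) : Bool :=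
  let totalLineas : Int := matriz.length
  let totalColumnas : Int := (PySem.List.pyGetD matriz 0 []).length
  pvALoop matriz totalLineas (PySem.List.pyRange 0 totalColumnas 1) false

-- ===== PORT B =====
-- B's `for fila in matriz` loop: filter the candidate column indices by each row, break when empty
def pvBLoop (first : List String) : List (List String) → List Int → List Int
  | [], cands => cands
  | fila :: rest, cands =>
    if cands = [] then cands
    else pvBLoop first rest
      (cands.filter (fun i => PySem.List.pyGetD fila i "" == PySem.List.pyGetD first i ""))

def hayColumnaLlena_alt (matriz : List (List String)) : Bool :=
  let first := PySem.List.pyGetD matriz 0 []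
  let cands := (PySem.List.pyRange 0 (first.length : Int) 1).filter
      (fun i => !(PySem.List.pyGetD first i "" == "."))
  !(pvBLoop first matriz cands).isEmpty

-- ===== PRECONDITION & SPEC =====
-- Pre_ requires matriz nonempty (A raises IndexError on []) and every row at least as long as the
-- first row: on matrices with a shorter row A either raises IndexError or (when an early full
-- column lets it return True first) B's row-major pass hits the short row and raises instead, so
-- all such ragged inputs are excluded.
def Pre_hayColumnaLlena (matriz : List (List String)) : Prop :=
  matriz ≠ [] ∧ (matriz.all (fun f => (matriz.headD []).length ≤ f.length)) = true
instance (matriz : List (List String)) : Decidable (Pre_hayColumnaLlena matriz) := by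
  unfold Pre_hayColumnaLlena; infer_instance

def pvWitness_hayColumnaLlena : List (List String) := [["a", "b"], ["a", "c"]]

def Spec_hayColumnaLlena (matriz : List (List String)) (out : Bool) : Prop := out = hayColumnaLlena_alt matriz
instance (matriz : List (List String)) (out : Bool) : Decidable (Spec_hayColumnaLlena matriz out) := by unfold Spec_hayColumnaLlena; infer_instance

-- ===== CLAIM (what is proved, stated in full; the proofs are below) =====
def Claim_equal_hayColumnaLlena : Prop := ∀ (matriz : List (List String)), Dom_hayColumnaLlena matriz → Pre_hayColumnaLlena matriz → Spec_hayColumnaLlena matriz (hayColumnaLlena matriz)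

-- ===== LEMMAS AND PROOFS =====

theorem pv_chain_false (col : List String) (prev : String) :
    (col.foldl (fun (st : Bool × String) e => (st.1 && (e == st.2), e)) (false, prev)).1 = false := by
  induction col generalizing prev with
  | nil => rfl
  | cons e rest ih => simpa using ih e

theorem pv_chain_true (col : List String) (prev : String) :
    (col.foldl (fun (st : Bool × String) e => (st.1 && (e == st.2), e)) (true, prev)).1
      = col.all (fun x => x == prev) := by
  induction col generalizing prev with
  | nil => rfl
  | cons e rest ih =>
    simp only [List.foldl_cons, List.all_cons]
    by_cases h : e = prev
    · subst h; simpa using ih e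
    · have hb : (e == prev) = false := by simp [h]
      rw [hb]
      simp [pv_chain_false]

-- A's column test, closed form: all cells equal the first-row cell, which is not "."
theorem pv_col_eq (r0 : List String) (rs : List (List String)) (i : Int) :
    pvAColRes (r0 :: rs) ((r0 :: rs).length : Int) i
      = ((!(PySem.List.pyGetD r0 i "" == ".")) &&
          (r0 :: rs).all (fun fila => PySem.List.pyGetD fila i "" == PySem.List.pyGetD r0 i "")) := by
  simp only [pvAColRes]
  rw [PySem.List.foldl_pyRange_zero_pyGetD' (r0 :: rs) ([] : List String)
      (fun (st : Bool × String) fila =>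
        (st.1 && ((PySem.List.pyGetD fila i "") == st.2), PySem.List.pyGetD fila i ""))]
  rw [← List.foldl_map (f := fun fila => PySem.List.pyGetD fila i "")
      (g := fun (st : Bool × String) e => (st.1 && (e == st.2), e))]
  simp only [List.map_cons, PySem.List.pyGetD_zero_cons]
  by_cases h : PySem.List.pyGetD r0 i "" = "."
  · rw [h]
    simp [pv_chain_false]
  · have hb : (PySem.List.pyGetD r0 i "" == ".") = false := by simp [h]
    rw [hb]
    simp [pv_chain_true, List.all_map, Function.comp_def]

-- A's outer loop started with False is an ∃-scan over the columns
theorem pv_loop_any (matriz : List (List String)) (tl : Int) (l : List Int) :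
    pvALoop matriz tl l false = l.any (fun i => pvAColRes matriz tl i) := by
  induction l with
  | nil => rfl
  | cons i rest ih =>
    simp only [pvALoop, List.any_cons]
    by_cases h : pvAColRes matriz tl i = true
    · simp [h]
    · simp only [Bool.not_eq_true] at h
      simp [h, ih]

-- B's row loop, closed form: the candidates that match the first-row cell in every row
theorem pv_bloop_eq (first : List String) (rows : List (List String)) (cands : List Int) :
    pvBLoop first rows cands
      = cands.filter (fun i =>
          rows.all (fun fila => PySem.List.pyGetD fila i "" == PySem.List.pyGetD first i "")) := by
  induction rows generalizing cands with
  | nil => simp [pvBLoop]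
  | cons fila rest ih =>
    simp only [pvBLoop]
    by_cases h : cands = []
    · simp [h]
    · rw [if_neg h, ih, List.filter_filter]
      refine List.filter_congr (fun i _ => ?_)
      simp [Bool.and_comm]

theorem pv_filter_not_empty (l : List Int) (p : Int → Bool) :
    (!(l.filter p).isEmpty) = l.any p := by
  induction l with
  | nil => rfl
  | cons a t ih => by_cases h : p a = true <;> simp [h, ih]

-- ===== VERDICT (by name: the statement is the Claim_ definition above) =====
theorem hayColumnaLlena_spec : Claim_equal_hayColumnaLlena := by
  intro matriz _ hpre
  obtain ⟨hne, -⟩ := hpre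
  obtain ⟨r0, rs, rfl⟩ : ∃ r0 rs, matriz = r0 :: rs := by
    cases matriz with
    | nil => exact absurd rfl hne
    | cons a l => exact ⟨a, l, rfl⟩
  unfold Spec_hayColumnaLlena hayColumnaLlena hayColumnaLlena_alt
  simp only [pv_loop_any, pv_bloop_eq, PySem.List.pyGetD_zero_cons, List.filter_filter,
    pv_filter_not_empty]
  refine List.any_congr rfl (fun i => ?_)
  rw [pv_col_eq r0 rs i]
  simp [Bool.and_comm]
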